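-- pv_equiv track=rewrite | github.com/wbenoit26/BBHNet | libs/architectures/aframe/architectures/preprocessor.py | _check_and_format_kwargs
-- ===== SOURCE A (Python) =====
-- from typing import Dict, List, Optional, Tuple
--
-- def _check_and_format_kwargs(kwargs: Dict[str, List]) -> List:
--     lengths = sorted(set([len(v) for v in kwargs.values()]))
--     if len(lengths) > 2 or (len(lengths) == 2 and lengths[0] != 1):
--         raise ValueError(
--             "Spectrogram keyword args should all have the same "
--             f"length or be of length one. Got lengths {lengths}"
--         )
--
--     if len(lengths) == 2:
--         size = lengths[1]
--         kwargs = {k: v * int(size / len(v)) for k, v in kwargs.items()}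
--
--     return [dict(zip(kwargs, col)) for col in zip(*kwargs.values())]
-- ===== SOURCE B (Python) =====
-- def _check_and_format_kwargs(kwargs):
--     lengths = sorted(set(len(v) for v in kwargs.values()))
--     if len(lengths) > 2 or (len(lengths) == 2 and lengths[0] != 1):
--         raise ValueError(
--             "Spectrogram keyword args should all have the same "
--             f"length or be of length one. Got lengths {lengths}"
--         )
--     size = lengths[-1] if lengths else 0
--     return [
--         {k: (v[i] if len(v) == size else v[0]) for k, v in kwargs.items()}
--         for i in range(size)
--     ]
-- ===== Notes on version B (the rewrite author's own statement) =====
-- stated objective: alternative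
-- what changed: B keeps A's validation (same ValueError and message) but builds each output row directly by index, taking v[i] if len(v)==size else v[0], instead of materializing broadcast lists with list multiplication and transposing with zip(*values).
import Mathlib
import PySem

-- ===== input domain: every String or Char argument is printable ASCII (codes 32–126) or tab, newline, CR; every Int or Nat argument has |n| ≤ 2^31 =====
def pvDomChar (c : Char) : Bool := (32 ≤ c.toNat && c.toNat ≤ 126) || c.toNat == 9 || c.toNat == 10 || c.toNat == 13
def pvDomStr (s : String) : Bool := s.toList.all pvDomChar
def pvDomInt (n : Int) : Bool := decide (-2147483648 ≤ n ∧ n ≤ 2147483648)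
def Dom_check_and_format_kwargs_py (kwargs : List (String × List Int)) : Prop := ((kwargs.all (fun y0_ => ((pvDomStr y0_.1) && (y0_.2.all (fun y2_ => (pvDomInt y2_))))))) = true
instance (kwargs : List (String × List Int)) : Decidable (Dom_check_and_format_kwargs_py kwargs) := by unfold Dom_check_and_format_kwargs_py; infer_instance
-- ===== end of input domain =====

-- B replaces A's broadcast-by-list-multiplication + zip(*values) transpose by building each
-- output row directly by index (v[i] if len(v)==size else v[0]); validation (and the ValueError,
-- excluded by Pre_) is kept identical. Objective: alternative (no speed claim).

-- ===== PORT A =====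
-- zip(*vals): stop at the shortest list, collect the heads, recurse on the tails.
def pyZipStar (vals : List (List Int)) : List (List Int) :=
  match vals with
  | [] => []
  | v :: vs =>
    if v.isEmpty || vs.any (fun w => w.isEmpty) then []
    else (v.headI :: vs.map (fun w => w.headI)) :: pyZipStar (v.tail :: vs.map (fun w => w.tail))
termination_by (vals.headI).length
decreasing_by
  simp only [List.headI]
  cases v with
  | nil => simp at *
  | cons a t => simp [List.tail]

def check_and_format_kwargs_py (kwargs : List (String × List Int)) : List (List (String × Int)) :=
  let lengths := PySem.List.sorted (PySem.Set.ofList (kwargs.map (fun p => (p.2.length : Int)))) (fun x => x) false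
  if lengths.length > 2 ∨ (lengths.length = 2 ∧ lengths.getD 0 0 ≠ 1) then
    []  -- Python raises ValueError here; excluded by Pre_
  else
    let kwargs2 := if lengths.length = 2 then
        -- int(size/len(v)) is exact here (positive, len divides or is 1), equal to Int division
        kwargs.map (fun p => (p.1, PySem.List.pyRepeat p.2 ((lengths.getD 1 0) / (p.2.length : Int))))
      else kwargs
    (pyZipStar (kwargs2.map (fun p => p.2))).map (fun col => (kwargs2.map (fun p => p.1)).zip col)

-- ===== PORT B =====
def check_and_format_kwargs_py_alt (kwargs : List (String × List Int)) : List (List (String × Int)) :=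
  let lengths := PySem.List.sorted (PySem.Set.ofList (kwargs.map (fun p => (p.2.length : Int)))) (fun x => x) false
  if lengths.length > 2 ∨ (lengths.length = 2 ∧ lengths.getD 0 0 ≠ 1) then
    []  -- Python raises ValueError here; excluded by Pre_
  else
    let size := if lengths = [] then (0 : Int) else lengths.getLast!
    (PySem.List.pyRange 0 size 1).map (fun i =>
      kwargs.map (fun p =>
        (p.1, if (p.2.length : Int) = size then PySem.List.pyGetD p.2 i 0 else PySem.List.pyGetD p.2 0 0)))

-- ===== PRECONDITION & SPEC =====
def pvMaxLen (kwargs : List (String × List Int)) : Nat :=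
  (kwargs.map (fun p => p.2.length)).foldr max 0

-- Pre_ excludes exactly the inputs on which A raises ValueError: some value list whose length
-- is neither the maximum length nor 1.
def Pre_check_and_format_kwargs_py (kwargs : List (String × List Int)) : Prop :=
  ∀ p ∈ kwargs, p.2.length = pvMaxLen kwargs ∨ p.2.length = 1
instance (kwargs : List (String × List Int)) : Decidable (Pre_check_and_format_kwargs_py kwargs) := by
  unfold Pre_check_and_format_kwargs_py; infer_instance

def pvWitness_check_and_format_kwargs_py : (List (String × List Int)) :=
  [("a", [1, 2, 3]), ("b", [7]), ("c", [4, 5, 6])]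

def Spec_check_and_format_kwargs_py (kwargs : List (String × List Int)) (out : List (List (String × Int))) : Prop := out = check_and_format_kwargs_py_alt kwargs
instance (kwargs : List (String × List Int)) (out : List (List (String × Int))) : Decidable (Spec_check_and_format_kwargs_py kwargs out) := by unfold Spec_check_and_format_kwargs_py; infer_instance

-- ===== CLAIM (what is proved, stated in full; the proofs are below) =====
def Claim_equal_check_and_format_kwargs_py : Prop := ∀ (kwargs : List (String × List Int)), Dom_check_and_format_kwargs_py kwargs → Pre_check_and_format_kwargs_py kwargs → Spec_check_and_format_kwargs_py kwargs (check_and_format_kwargs_py kwargs)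

-- ===== LEMMAS AND PROOFS =====

-- zip(*vals) on lists all of length n is the n index rows
theorem headI_eq_getD (w : List Int) (hw : w ≠ []) : w.headI = w.getD 0 0 := by
  cases w with
  | nil => exact absurd rfl hw
  | cons a t => simp [List.headI]

theorem tail_getD (w : List Int) (hw : w ≠ []) (i : Nat) : w.tail.getD i 0 = w.getD (i + 1) 0 := by
  cases w with
  | nil => exact absurd rfl hw
  | cons a t => simp

theorem pyZipStar_uniform (n : Nat) :
    ∀ (vals : List (List Int)), vals ≠ [] → (∀ v ∈ vals, v.length = n) →
    pyZipStar vals = (List.range n).map (fun i => vals.map (fun v => v.getD i 0)) := by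
  induction n with
  | zero =>
    intro vals hne hlen
    match vals, hne with
    | v :: vs, _ =>
      rw [pyZipStar]
      have hv : v.isEmpty = true := by
        simp [List.eq_nil_of_length_eq_zero (hlen v (by simp))]
      simp [hv]
  | succ m ih =>
    intro vals hne hlen
    match vals, hne with
    | v :: vs, _ =>
      have hnil : ∀ w ∈ v :: vs, w ≠ [] := by
        intro w hw hwnil
        have := hlen w hw; rw [hwnil] at this; simp at this
      rw [pyZipStar]
      have hcond : (v.isEmpty || vs.any fun w => w.isEmpty) = false := by
        simp only [Bool.or_eq_false_iff, List.any_eq_false]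
        constructor
        · simpa [List.isEmpty_iff] using hnil v (by simp)
        · intro w hw; simpa [List.isEmpty_iff] using hnil w (by simp [hw])
      rw [hcond]
      simp only [Bool.false_eq_true, if_false]
      have htl : pyZipStar (v.tail :: vs.map (fun w => w.tail)) =
          (List.range m).map (fun i => (v.tail :: vs.map (fun w => w.tail)).map (fun w => w.getD i 0)) := by
        apply ih _ (by simp)
        intro w hw
        simp only [List.mem_cons, List.mem_map] at hw
        rcases hw with h | ⟨u, hu, h⟩
        · subst h; have := hlen v (by simp); simp [List.length_tail, this]
        · subst h; have := hlen u (by simp [hu]); simp [List.length_tail, this]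
      rw [htl, List.range_succ_eq_map]
      simp only [List.map_cons, List.map_map]
      congr 1
      · -- heads row
        rw [headI_eq_getD v (hnil v (by simp))]
        congr 1
        apply List.map_congr_left
        intro w hw
        exact headI_eq_getD w (hnil w (by simp [hw]))
      · -- tail rows
        apply List.map_congr_left
        intro i _
        simp only [Function.comp]
        rw [tail_getD v (hnil v (by simp))]
        congr 1
        apply List.map_congr_left
        intro w hw
        exact tail_getD w (hnil w (by simp [hw])) i

theorem pyRepeat_one (xs : List Int) : PySem.List.pyRepeat xs 1 = xs := by
  simp [PySem.List.pyRepeat]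

theorem getD_replicate_of_lt (x : Int) (n i : Nat) (hi : i < n) :
    (List.replicate n x).getD i 0 = x := by
  simp [List.getD_eq_getElem?_getD, hi]

theorem len_one_eq (v : List Int) (h : v.length = 1) : v = [v.getD 0 0] := by
  match v, h with
  | [x], _ => rfl

-- ===== VERDICT (by name: the statement is the Claim_ definition above) =====
theorem check_and_format_kwargs_py_spec : Claim_equal_check_and_format_kwargs_py := by
  intro kwargs _ _
  show check_and_format_kwargs_py kwargs = check_and_format_kwargs_py_alt kwargs
  obtain ⟨L, hL⟩ : ∃ L, PySem.List.sorted
      (PySem.Set.ofList (kwargs.map (fun p => ((p.2.length : Int))))) (fun x => x) false = L := ⟨_, rfl⟩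
  have hmem : ∀ x : Int, x ∈ L ↔ x ∈ kwargs.map (fun p => ((p.2.length : Int))) := by
    intro x; rw [← hL, PySem.List.mem_sorted, PySem.Set.mem_ofList]
  have hpair : L.Pairwise (· < ·) := hL ▸ PySem.List.sorted_ofList_pairwise_lt _
  simp only [check_and_format_kwargs_py, check_and_format_kwargs_py_alt, hL]
  match L, hmem, hpair with
  | [], hmem, _ =>
    have hk : kwargs = [] := by
      cases kwargs with
      | nil => rfl
      | cons q t =>
        have := (hmem ((q.2.length : Int))).mpr (by simp)
        simp at this
    subst hk
    simp [pyZipStar]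
  | [a], hmem, _ =>
    have ha : ∀ p ∈ kwargs, ((p.2.length : Int)) = a := by
      intro p hp
      have := (hmem ((p.2.length : Int))).mpr (List.mem_map_of_mem hp)
      simpa using this
    have hkne : kwargs ≠ [] := by
      intro h; subst h
      have := (hmem a).mp (by simp)
      simp at this
    obtain ⟨p0, hp0, hp0a⟩ := List.mem_map.mp ((hmem a).mp (by simp))
    have ha0 : 0 ≤ a := by rw [← hp0a]; positivity
    have hguard : ¬(([a] : List Int).length > 2 ∨ (([a] : List Int).length = 2 ∧ ([a] : List Int).getD 0 0 ≠ 1)) := by simp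
    have hgl : ([a] : List Int).getLast! = a := by simp [List.getLast!]
    simp only [if_neg hguard, if_neg (by simp : ¬([a] : List Int).length = 2),
      if_neg (List.cons_ne_nil a []), hgl]
    rw [pyZipStar_uniform a.toNat (kwargs.map (fun p => p.2)) (by simpa using hkne)
      (by intro v hv
          obtain ⟨p, hp, rfl⟩ := List.mem_map.mp hv
          have := ha p hp; omega)]
    rw [PySem.List.pyRange_one]
    simp only [Int.sub_zero, zero_add, List.map_map]
    apply List.map_congr_left
    intro i hi
    simp only [Function.comp_def, List.zip_map']
    apply List.map_congr_left
    intro p hp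
    have hpa := ha p hp
    rw [if_pos hpa]
    simp
  | [a, b], hmem, hpair =>
    have hab : a < b := by
      rcases List.pairwise_cons.mp hpair with ⟨h1, _⟩
      exact h1 b (by simp)
    by_cases ha1 : a = 1
    · subst ha1
      have hmem2 : ∀ p ∈ kwargs, ((p.2.length : Int)) = 1 ∨ ((p.2.length : Int)) = b := by
        intro p hp
        have := (hmem ((p.2.length : Int))).mpr (List.mem_map_of_mem hp)
        simpa using this
      obtain ⟨pb, hpb, hpbb⟩ := List.mem_map.mp ((hmem b).mp (by simp))
      have hb0 : 0 ≤ b := by rw [← hpbb]; positivity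
      have hguard : ¬((([1, b] : List Int).length > 2) ∨ (([1, b] : List Int).length = 2 ∧ ([1, b] : List Int).getD 0 0 ≠ 1)) := by simp
      have hgl : ([1, b] : List Int).getLast! = b := by simp [List.getLast!]
      have hget1 : ([1, b] : List Int).getD 1 0 = b := by simp
      simp only [if_neg hguard, if_pos (by simp : ([1, b] : List Int).length = 2),
        if_neg (List.cons_ne_nil (1 : Int) [b]), hgl, hget1]
      -- broadcast characterisation
      have hbc : ∀ p ∈ kwargs, PySem.List.pyRepeat p.2 (b / ((p.2.length : Int))) =
          if ((p.2.length : Int)) = b then p.2 else List.replicate b.toNat (p.2.getD 0 0) := by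
        intro p hp
        rcases hmem2 p hp with h1 | hb
        · rw [if_neg (by omega)]
          have hv : p.2 = [p.2.getD 0 0] := len_one_eq p.2 (by omega)
          rw [h1, hv, Int.ediv_one, PySem.List.pyRepeat_singleton]
          simp
        · rw [if_pos hb, hb, Int.ediv_self (by omega), pyRepeat_one]
      rw [pyZipStar_uniform b.toNat
        ((kwargs.map (fun p => (p.1, PySem.List.pyRepeat p.2 (b / ((p.2.length : Int)))))).map (fun p => p.2))
        (by intro h
            rw [List.map_eq_nil_iff, List.map_eq_nil_iff] at h
            subst h
            have := (hmem b).mp (by simp)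
            simp at this)
        (by intro v hv
            rw [List.map_map] at hv
            obtain ⟨p, hp, rfl⟩ := List.mem_map.mp hv
            simp only [Function.comp_def]
            rw [hbc p hp]
            rcases hmem2 p hp with h1 | hb
            · rw [if_neg (by omega)]; simp
            · rw [if_pos hb]; omega)]
      rw [PySem.List.pyRange_one]
      simp only [Int.sub_zero, zero_add, List.map_map]
      apply List.map_congr_left
      intro i hi
      have hilt : i < b.toNat := List.mem_range.mp hi
      simp only [Function.comp_def, List.zip_map']
      apply List.map_congr_left
      intro p hp
      rw [hbc p hp]
      rcases hmem2 p hp with h1 | hb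
      · rw [if_neg (by omega), if_neg (by omega)]
        rw [getD_replicate_of_lt _ _ _ hilt, PySem.List.pyGetD_zero]
      · rw [if_pos hb, if_pos hb]
        try simp
    · -- a ≠ 1 : the guard fires in both ports (Python raises; outside Pre_)
      have hguard : (([a, b] : List Int).length > 2) ∨ (([a, b] : List Int).length = 2 ∧ ([a, b] : List Int).getD 0 0 ≠ 1) := by
        right; exact ⟨by simp, by simpa using ha1⟩
      simp only [if_pos hguard]
  | a :: b :: c :: r, _, _ =>
    have hguard : (((a :: b :: c :: r) : List Int).length > 2) ∨ (((a :: b :: c :: r) : List Int).length = 2 ∧ ((a :: b :: c :: r) : List Int).getD 0 0 ≠ 1) := by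
      left
      simp only [List.length_cons]
      omega
    simp only [if_pos hguard]
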